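-- pv_equiv track=rewrite | github.com/preciousiajilore/CMPUT331_ass4 | a4_starter/a4p3.py | it_fits
-- ===== SOURCE A (Python) =====
-- def it_fits(cipherword: str, plainword: str, fixed: dict, used_plain: set):
--     #temporary copies
--     temp_fixed = dict(fixed)
--     temp_plain = set(used_plain)
--
--
--     for cipword, plword in zip(cipherword, plainword):
--         #if the cipword has as an assigned, it must match
--         if cipword in temp_fixed:
--             if temp_fixed[cipword] != plword:
--                 #look it up and check if the cipherword matching is the same
--                 return False
--         else:
--             #try not to reuse the plaintext letter that has already been used by another cipher which is why used_plain is a set so we can keep track of duplicates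
--             if plword in temp_plain:
--                 return False
--             temp_fixed[cipword] = plword
--             #add it to letters that have been used
--             temp_plain.add(plword)
--
--     return True
-- ===== SOURCE B (Python) =====
-- def it_fits(cipherword: str, plainword: str, fixed: dict, used_plain: set):
--     # Pass 1: build the table of proposed new assignments, checking consistency
--     # against `fixed` and within the new assignments themselves.
--     new_map = {}
--     for c, p in zip(cipherword, plainword):
--         if c in fixed:
--             if fixed[c] != p:
--                 return False
--         elif new_map.setdefault(c, p) != p:
--             return False
--     # Pass 2: validate the new assignments' targets: none already used, no two
--     # new cipher letters sharing one plain letter.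
--     vals = list(new_map.values())
--     if any(v in used_plain for v in vals):
--         return False
--     return len(set(vals)) == len(vals)
-- ===== Notes on version B (the rewrite author's own statement) =====
-- stated objective: alternative
-- what changed: A interleaves constraint-checking with updating its temporary dict/set inside one loop with three kinds of early returns; B first builds a table new_map of the proposed fresh assignments (checking only consistency against fixed and within new_map), then validates all of new_map's target letters in a separate second pass against used_plain and against duplicates among themselves.
import Mathlib
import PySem

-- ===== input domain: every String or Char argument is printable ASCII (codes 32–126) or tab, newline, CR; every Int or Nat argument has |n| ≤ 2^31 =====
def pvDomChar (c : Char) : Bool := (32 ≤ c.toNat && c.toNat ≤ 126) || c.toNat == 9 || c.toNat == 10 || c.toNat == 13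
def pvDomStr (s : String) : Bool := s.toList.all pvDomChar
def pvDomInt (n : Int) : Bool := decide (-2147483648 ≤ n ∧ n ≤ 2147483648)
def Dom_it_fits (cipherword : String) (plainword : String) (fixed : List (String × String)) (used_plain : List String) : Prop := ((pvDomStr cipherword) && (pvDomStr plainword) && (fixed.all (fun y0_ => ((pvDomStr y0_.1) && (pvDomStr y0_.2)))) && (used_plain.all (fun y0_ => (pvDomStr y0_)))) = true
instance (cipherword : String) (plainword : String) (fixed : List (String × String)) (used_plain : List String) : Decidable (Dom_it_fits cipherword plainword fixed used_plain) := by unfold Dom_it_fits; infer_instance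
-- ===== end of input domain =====

-- B builds the table of fresh assignments first and validates it in a second pass,
-- instead of A's single loop that interleaves checking with updating (objective: alternative decomposition).

-- ===== PORT A =====
-- A's single loop: state = (temp_fixed, temp_plain), three early-False exits.
def itFitsLoopA : List (Char × Char) → PySem.Dict String String → PySem.Set String → Bool
  | [], _tf, _tp => true
  | (c, p) :: rest, tf, tp =>
    match tf.get? c.toString with
    | some v => if v ≠ p.toString then false else itFitsLoopA rest tf tp
    | none =>
      if PySem.Set.contains tp p.toString then false
      else itFitsLoopA rest (tf.insert c.toString p.toString) (PySem.Set.add tp p.toString)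

def it_fits (cipherword : String) (plainword : String) (fixed : List (String × String)) (used_plain : List String) : Bool :=
  itFitsLoopA (cipherword.toList.zip plainword.toList) (PySem.Dict.mk fixed) (PySem.Set.ofList used_plain)

-- ===== PORT B =====
-- Pass 1 of B: build new_map, checking only consistency against `fixed` and inside new_map.
def itFitsBuild (F : PySem.Dict String String) : List (Char × Char) → PySem.Dict String String → Option (PySem.Dict String String)
  | [], nm => some nm
  | (c, p) :: rest, nm =>
    match F.get? c.toString with
    | some v => if v ≠ p.toString then none else itFitsBuild F rest nm
    | none =>
      match nm.get? c.toString with      -- new_map.setdefault(c, p)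
      | some v => if v ≠ p.toString then none else itFitsBuild F rest nm
      | none => itFitsBuild F rest (nm.insert c.toString p.toString)

-- Pass 2 of B: validate new_map's values against used_plain and against duplicates.
def itFitsCheck (nm : PySem.Dict String String) (used_plain : List String) : Bool :=
  if nm.values.any (fun v => PySem.Set.contains used_plain v) then false
  else PySem.List.len (PySem.Set.ofList nm.values) == PySem.List.len nm.values

def it_fits_alt (cipherword : String) (plainword : String) (fixed : List (String × String)) (used_plain : List String) : Bool :=
  match itFitsBuild (PySem.Dict.mk fixed) (cipherword.toList.zip plainword.toList) PySem.Dict.empty with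
  | none => false
  | some nm => itFitsCheck nm used_plain

-- ===== PRECONDITION & SPEC =====
def Spec_it_fits (cipherword : String) (plainword : String) (fixed : List (String × String)) (used_plain : List String) (out : Bool) : Prop := out = it_fits_alt cipherword plainword fixed used_plain
instance (cipherword : String) (plainword : String) (fixed : List (String × String)) (used_plain : List String) (out : Bool) : Decidable (Spec_it_fits cipherword plainword fixed used_plain out) := by unfold Spec_it_fits; infer_instance

-- ===== CLAIM (what is proved, stated in full; the proofs are below) =====
def Claim_equal_it_fits : Prop := ∀ (cipherword : String) (plainword : String) (fixed : List (String × String)) (used_plain : List String), Dom_it_fits cipherword plainword fixed used_plain → Spec_it_fits cipherword plainword fixed used_plain (it_fits cipherword plainword fixed used_plain)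

-- ===== LEMMAS AND PROOFS =====

-- len(set(vals)) == len(vals) iff vals has no duplicates
lemma pv_len_ofList_eq_iff {α : Type} [BEq α] [LawfulBEq α] (xs : List α) :
    (PySem.Set.ofList xs).length = xs.length ↔ xs.Nodup := by
  induction xs with
  | nil => simp [PySem.Set.ofList]
  | cons x xs ih =>
    rw [PySem.Set.ofList_cons]
    by_cases hx : x ∈ xs
    · have hmem : x ∈ PySem.Set.ofList xs := (PySem.Set.mem_ofList _ _).mpr hx
      have hlt : (PySem.Set.discard (PySem.Set.ofList xs) x).length < (PySem.Set.ofList xs).length := by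
        simp only [PySem.Set.discard]
        refine List.length_filter_lt_length_iff_exists.mpr ⟨x, hmem, by simp⟩
      have hle := PySem.Set.length_ofList_le (xs := xs)
      simp only [List.length_cons, List.nodup_cons]
      constructor
      · intro h; omega
      · rintro ⟨h, -⟩; exact absurd hx h
    · have hdis : PySem.Set.discard (PySem.Set.ofList xs) x = PySem.Set.ofList xs := by
        simp only [PySem.Set.discard]
        refine List.filter_eq_self.mpr ?_
        intro y hy
        have hyxs : y ∈ xs := (PySem.Set.mem_ofList _ _).mp hy
        simp only [Bool.not_eq_eq_eq_not, Bool.not_true, beq_eq_false_iff_ne, ne_eq]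
        rintro rfl; exact hx hyxs
      rw [hdis]
      simp only [List.length_cons, List.nodup_cons, hx, not_false_iff, true_and]
      exact ⟨fun h => ih.mp (by omega), fun h => by have := ih.mpr h; omega⟩

-- itFitsBuild never removes or changes an established binding
lemma pv_build_mono (L : List (Char × Char)) :
    ∀ (F nm nm' : PySem.Dict String String) (k : String) (v : String),
    itFitsBuild F L nm = some nm' → nm.get? k = some v → nm'.get? k = some v := by
  induction L with
  | nil => intro F nm nm' k v h hk; cases h; exact hk
  | cons cp rest ih =>
    intro F nm nm' k v h hk
    obtain ⟨c, p⟩ := cp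
    simp only [itFitsBuild] at h
    cases hF : F.get? c.toString with
    | some w =>
      simp only [hF] at h
      by_cases hw : w = p.toString
      · rw [if_neg (fun hn => hn hw)] at h; exact ih F nm nm' k v h hk
      · rw [if_pos hw] at h; cases h
    | none =>
      simp only [hF] at h
      cases hnm : nm.get? c.toString with
      | some w =>
        simp only [hnm] at h
        by_cases hw : w = p.toString
        · rw [if_neg (fun hn => hn hw)] at h; exact ih F nm nm' k v h hk
        · rw [if_pos hw] at h; cases h
      | none =>
        simp only [hnm] at h
        refine ih F _ nm' k v h ?_
        have hne : k ≠ c.toString := by rintro rfl; rw [hk] at hnm; cases hnm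
        rw [PySem.Dict.get?_insert_of_ne _ _ hne]; exact hk

-- a value present under some key
lemma pv_values_get? (nm : PySem.Dict String String) (v : String)
    (hnd : nm.keys.Nodup) (hv : v ∈ nm.values) : ∃ k, nm.get? k = some v := by
  simp only [PySem.Dict.values, List.mem_map] at hv
  obtain ⟨⟨k, w⟩, hmem, hw⟩ := hv
  cases hw
  exact ⟨k, PySem.Dict.get?_of_mem_items _ hmem hnd⟩

-- pass 2 fails when a value is already used
lemma pv_check_used (nm : PySem.Dict String String) (used : List String) (k v : String)
    (hk : nm.get? k = some v) (hv : v ∈ used) : itFitsCheck nm used = false := by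
  have hmem : v ∈ nm.values := by
    have := PySem.Dict.mem_items_of_get?_eq_some _ hk
    simp only [PySem.Dict.values, List.mem_map]
    exact ⟨(k, v), this, rfl⟩
  have hany : nm.values.any (fun v => PySem.Set.contains used v) = true := by
    refine List.any_eq_true.mpr ⟨v, hmem, ?_⟩
    simp [PySem.Set.contains_eq_listContains, hv]
  unfold itFitsCheck
  rw [if_pos hany]

-- pass 2 fails when two distinct keys share a value
lemma pv_check_dup (nm : PySem.Dict String String) (used : List String) (k1 k2 v : String)
    (hne : k1 ≠ k2)
    (h1 : nm.get? k1 = some v) (h2 : nm.get? k2 = some v) : itFitsCheck nm used = false := by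
  have hvals : ¬ nm.values.Nodup := by
    intro hvn
    have hm1 := PySem.Dict.mem_items_of_get?_eq_some _ h1
    have hm2 := PySem.Dict.mem_items_of_get?_eq_some _ h2
    have : (k1, v) = (k2, v) :=
      List.inj_on_of_nodup_map hvn hm1 hm2 rfl
    exact hne (by injection this)
  have hlen : (PySem.Set.ofList nm.values).length ≠ nm.values.length := by
    intro h; exact hvals ((pv_len_ofList_eq_iff _).mp h)
  unfold itFitsCheck
  split
  · rfl
  · simp only [PySem.List.len_eq]
    rw [beq_eq_false_iff_ne]
    intro h
    exact hlen (by exact_mod_cast h)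

-- the main invariant: A's interleaved loop equals "finish building, then check"
lemma pv_loopA_eq_build (L : List (Char × Char)) :
    ∀ (F nm tf : PySem.Dict String String) (used : List String) (tp : PySem.Set String),
    (∀ k, tf.get? k = Option.or (F.get? k) (nm.get? k)) →
    (∀ v, v ∈ tp ↔ v ∈ used ∨ v ∈ nm.values) →
    nm.keys.Nodup →
    nm.values.Nodup →
    (∀ v ∈ nm.values, v ∉ used) →
    itFitsLoopA L tf tp =
      (match itFitsBuild F L nm with
       | none => false
       | some nm' => itFitsCheck nm' used) := by
  induction L with
  | nil =>
    intro F nm tf used tp _htf _htp hknd hvnd hvu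
    simp only [itFitsLoopA, itFitsBuild]
    have hany : nm.values.any (fun v => PySem.Set.contains used v) = false := by
      refine List.any_eq_false.mpr ?_
      intro v hv
      simp [PySem.Set.contains_eq_listContains]
      exact hvu v hv
    unfold itFitsCheck
    rw [if_neg (ne_true_of_eq_false hany)]
    simp [PySem.List.len_eq, (pv_len_ofList_eq_iff nm.values).mpr hvnd]
  | cons cp rest ih =>
    intro F nm tf used tp htf htp hknd hvnd hvu
    obtain ⟨c, p⟩ := cp
    simp only [itFitsLoopA, itFitsBuild]
    cases hF : F.get? c.toString with
    | some w =>
      have : tf.get? c.toString = some w := by rw [htf, hF]; rfl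
      simp only [this]
      by_cases hw : w = p.toString
      · rw [if_neg (fun hn => hn hw), if_neg (fun hn => hn hw)]
        exact ih F nm tf used tp htf htp hknd hvnd hvu
      · rw [if_pos hw, if_pos hw]
    | none =>
      cases hnm : nm.get? c.toString with
      | some w =>
        have : tf.get? c.toString = some w := by rw [htf, hF, hnm]; rfl
        simp only [this]
        by_cases hw : w = p.toString
        · rw [if_neg (fun hn => hn hw), if_neg (fun hn => hn hw)]
          exact ih F nm tf used tp htf htp hknd hvnd hvu
        · rw [if_pos hw, if_pos hw]
      | none =>
        have htfc : tf.get? c.toString = none := by rw [htf, hF, hnm]; rfl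
        simp only [htfc]
        have hcontains : nm.contains c.toString = false := by
          rw [PySem.Dict.contains_eq_isSome_get?, hnm]; rfl
        have hvalsins : (nm.insert c.toString p.toString).values = nm.values ++ [p.toString] := by
          simp only [PySem.Dict.values, PySem.Dict.items_insert_of_not_contains _ _ hcontains,
            List.map_append, List.map_cons, List.map_nil]
        by_cases hps : PySem.Set.contains tp p.toString = true
        · -- A fails now; B fails in pass 2 (or pass 1)
          rw [if_pos hps]
          have hmem : p.toString ∈ used ∨ p.toString ∈ nm.values :=
            (htp _).mp ((PySem.Set.contains_iff _ _).mp hps)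
          cases hb : itFitsBuild F rest (nm.insert c.toString p.toString) with
          | none => rfl
          | some nm' =>
            have hself : (nm.insert c.toString p.toString).get? c.toString = some p.toString :=
              PySem.Dict.get?_insert_self _ _ _
            have hcs : nm'.get? c.toString = some p.toString :=
              pv_build_mono rest F _ nm' _ _ hb hself
            cases hmem with
            | inl hused => exact (pv_check_used nm' used _ _ hcs hused).symm
            | inr hval =>
              obtain ⟨k0, hk0⟩ := pv_values_get? nm _ hknd hval
              have hk0ne : k0 ≠ c.toString := by rintro rfl; rw [hk0] at hnm; cases hnm
              have hk0' : nm'.get? k0 = some p.toString := by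
                refine pv_build_mono rest F _ nm' _ _ hb ?_
                rw [PySem.Dict.get?_insert_of_ne _ _ hk0ne]; exact hk0
              exact (pv_check_dup nm' used k0 c.toString _ hk0ne hk0' hcs).symm
        · -- fresh assignment: both sides record it and continue
          rw [if_neg hps]
          have hpsmem : p.toString ∉ used ∧ p.toString ∉ nm.values := by
            have : ¬ (p.toString ∈ used ∨ p.toString ∈ nm.values) := by
              intro h
              exact hps ((PySem.Set.contains_iff _ _).mpr ((htp _).mpr h))
            exact ⟨fun h => this (Or.inl h), fun h => this (Or.inr h)⟩
          refine ih F (nm.insert c.toString p.toString) _ used _ ?_ ?_ ?_ ?_ ?_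
          · intro k
            by_cases hk : k = c.toString
            · subst hk
              rw [PySem.Dict.get?_insert_self, hF, PySem.Dict.get?_insert_self]; rfl
            · rw [PySem.Dict.get?_insert_of_ne _ _ hk, htf,
                PySem.Dict.get?_insert_of_ne _ _ hk]
          · intro v
            rw [PySem.Set.mem_add, htp, hvalsins]
            simp [or_assoc]
          · exact PySem.Dict.nodup_keys_insert _ _ _ hknd
          · rw [hvalsins]
            refine List.Nodup.append hvnd (List.nodup_singleton _) ?_
            intro a ha hb
            simp only [List.mem_singleton] at hb
            subst hb
            exact hpsmem.2 ha
          · rw [hvalsins]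
            intro v hv
            rcases List.mem_append.mp hv with h | h
            · exact hvu v h
            · simp at h; subst h; exact hpsmem.1

-- ===== VERDICT (by name: the statement is the Claim_ definition above) =====
theorem it_fits_spec : Claim_equal_it_fits := by
  intro cipherword plainword fixed used_plain _hdom
  unfold Spec_it_fits it_fits it_fits_alt
  refine pv_loopA_eq_build _ (PySem.Dict.mk fixed) PySem.Dict.empty _ used_plain _ ?_ ?_ ?_ ?_ ?_
  · intro k; simp only [PySem.Dict.get?_empty]; cases (PySem.Dict.mk fixed).get? k <;> rfl
  · intro v; simp [PySem.Set.mem_ofList, PySem.Dict.values, PySem.Dict.empty]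
  · simp [PySem.Dict.keys, PySem.Dict.empty]
  · simp [PySem.Dict.values, PySem.Dict.empty]
  · intro v hv; simp [PySem.Dict.values, PySem.Dict.empty] at hv
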